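-- pv_equiv track=rewrite | github.com/vbalashi/idol_docs2md | validate_and_fix_epub.py | naive_convert_angles
-- ===== SOURCE A (Python) =====
-- def naive_convert_angles(txt):
--     result = []
--     i = 0
--     in_tag = False
--     known_starts = (
--         '<p','<div','<span','<a','<img','<h1','<h2','<h3','<h4','<h5','<h6',
--         '<ul','<ol','<li','<table','<tr','<td','<th','<em','<strong','<b','<i',
--         '<br','<hr','<!','<?'
--     )
--     while i < len(txt):
--         c = txt[i]
--         if c == '<':
--             snippet = txt[i:].lower()
--             if any(snippet.startswith(k) for k in known_starts):
--                 result.append('<')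
--                 in_tag = True
--             else:
--                 result.append('&lt;')
--             i += 1
--         elif c == '>':
--             if in_tag:
--                 result.append('>')
--                 in_tag = False
--             else:
--                 result.append('&gt;')
--             i += 1
--         else:
--             result.append(c)
--             i += 1
--     return ''.join(result)
-- ===== SOURCE B (Python) =====
-- KNOWN_STARTS = (
--     '<p','<div','<span','<a','<img','<h1','<h2','<h3','<h4','<h5','<h6',
--     '<ul','<ol','<li','<table','<tr','<td','<th','<em','<strong','<b','<i',
--     '<br','<hr','<!','<?'
-- )
--
-- def _escape_segment(seg):
--     """Escape each '<' in a '>'-free segment unless its suffix starts a known tag."""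
--     out = []
--     for j, ch in enumerate(seg):
--         if ch == '<' and not seg[j:].lower().startswith(KNOWN_STARTS):
--             out.append('&lt;')
--         else:
--             out.append(ch)
--     return ''.join(out)
--
-- def _has_known_open(seg):
--     """Does the segment contain a '<' that starts a known tag?"""
--     return any(seg[j:].lower().startswith(KNOWN_STARTS)
--                for j, ch in enumerate(seg) if ch == '<')
--
-- def naive_convert_angles(txt):
--     segments = txt.split('>')
--     pieces = []
--     for idx, seg in enumerate(segments):
--         pieces.append(_escape_segment(seg))
--         if idx < len(segments) - 1:
--             pieces.append('>' if _has_known_open(seg) else '&gt;')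
--     return ''.join(pieces)
-- ===== Notes on version B (the rewrite author's own statement) =====
-- stated objective: alternative
-- what changed: Replaces A's single index-by-index scan carrying an in_tag flag across the whole string by a stateless decomposition: split the text on the closing angle bracket, escape each segment's stray openers locally via a suffix prefix-test, and rejoin with a literal or escaped closing bracket depending on whether the preceding segment contained a known tag opener.
import Mathlib
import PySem

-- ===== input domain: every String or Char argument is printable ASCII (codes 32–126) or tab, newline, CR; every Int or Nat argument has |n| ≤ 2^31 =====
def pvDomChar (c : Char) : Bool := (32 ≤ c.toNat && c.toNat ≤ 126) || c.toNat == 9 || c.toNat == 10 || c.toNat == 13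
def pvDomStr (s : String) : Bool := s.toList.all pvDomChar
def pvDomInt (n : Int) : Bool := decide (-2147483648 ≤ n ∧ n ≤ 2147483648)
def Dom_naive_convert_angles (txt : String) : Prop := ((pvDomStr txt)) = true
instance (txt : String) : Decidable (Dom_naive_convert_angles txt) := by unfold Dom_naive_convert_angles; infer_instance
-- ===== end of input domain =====

-- B replaces A's single stateful scan (in_tag flag threaded through the whole string) by a
-- stateless split on '>' with per-segment escaping; objective: alternative decomposition, same cost.

-- ===== PORT A =====
-- the tuple 'known_starts' of A (shared literal; both Pythons name the same constant)
def knownStarts : List (List Char) :=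
  ["<p".toList, "<div".toList, "<span".toList, "<a".toList, "<img".toList,
   "<h1".toList, "<h2".toList, "<h3".toList, "<h4".toList, "<h5".toList, "<h6".toList,
   "<ul".toList, "<ol".toList, "<li".toList, "<table".toList, "<tr".toList, "<td".toList,
   "<th".toList, "<em".toList, "<strong".toList, "<b".toList, "<i".toList,
   "<br".toList, "<hr".toList, "<!".toList, "<?".toList]

-- any(snippet.startswith(k) for k in known_starts)
def isKnownStart (snippet : List Char) : Bool :=
  knownStarts.any (fun k => PySem.Chars.startswith snippet k)

-- A's while loop: index-by-index scan carrying in_tag; result accumulated front-to-back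
def goA : List Char → Bool → List Char
  | [], _ => []
  | c :: rest, inTag =>
    if c = '<' then
      if isKnownStart (PySem.Chars.lower (c :: rest)) then '<' :: goA rest true
      else "&lt;".toList ++ goA rest inTag
    else if c = '>' then
      if inTag then '>' :: goA rest false
      else "&gt;".toList ++ goA rest false
    else c :: goA rest inTag

def naive_convert_angles (txt : String) : String :=
  String.ofList (goA txt.toList false)

-- ===== PORT B =====
-- txt.split('>') (hand port of split on the single character '>'; exact)
def splitGt : List Char → List (List Char)
  | [] => [[]]
  | c :: r =>
    match splitGt r with
    | [] => [[]]   -- unreachable: splitGt never returns []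
    | s :: ss => if c = '>' then [] :: s :: ss else (c :: s) :: ss

-- _escape_segment
def escSeg : List Char → List Char
  | [] => []
  | c :: r =>
    (if c = '<' ∧ isKnownStart (PySem.Chars.lower (c :: r)) = false
     then "&lt;".toList else [c]) ++ escSeg r

-- _has_known_open
def hasKnown : List Char → Bool
  | [] => false
  | c :: r => (decide (c = '<') && isKnownStart (PySem.Chars.lower (c :: r))) || hasKnown r

-- the join loop of B: each segment escaped, a '>' or '&gt;' between consecutive segments
def joinB : List (List Char) → List Char
  | [] => []
  | [s] => escSeg s
  | s :: ss => escSeg s ++ (if hasKnown s then ['>'] else "&gt;".toList) ++ joinB ss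

def naive_convert_angles_alt (txt : String) : String :=
  String.ofList (joinB (splitGt txt.toList))

-- ===== PRECONDITION & SPEC =====
def Spec_naive_convert_angles (txt : String) (out : String) : Prop := out = naive_convert_angles_alt txt
instance (txt : String) (out : String) : Decidable (Spec_naive_convert_angles txt out) := by unfold Spec_naive_convert_angles; infer_instance

-- ===== CLAIM (what is proved, stated in full; the proofs are below) =====
def Claim_equal_naive_convert_angles : Prop := ∀ (txt : String), Dom_naive_convert_angles txt → Spec_naive_convert_angles txt (naive_convert_angles txt)

-- ===== LEMMAS AND PROOFS =====

theorem knownStarts_no_gt : ∀ k ∈ knownStarts, '>' ∉ k := by decide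

theorem prefix_break (k : List Char) (hk : '>' ∉ k) :
    ∀ (a b : List Char), (k <+: a ++ '>' :: b ↔ k <+: a) := by
  induction k with
  | nil => intro a b; simp
  | cons x k ih =>
    intro a b
    cases a with
    | nil =>
      simp only [List.nil_append, List.cons_prefix_cons]
      constructor
      · rintro ⟨rfl, -⟩; exact absurd (by simp) hk
      · rintro h; exact absurd h (List.cons_ne_nil x k ∘ List.prefix_nil.mp)
    | cons y a =>
      simp only [List.cons_append, List.cons_prefix_cons]
      have hk' : '>' ∉ k := fun h => hk (List.mem_cons_of_mem _ h)
      exact and_congr_right fun _ => ih hk' a b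

theorem lower_break (a b : List Char) :
    PySem.Chars.lower (a ++ '>' :: b) = PySem.Chars.lower a ++ '>' :: PySem.Chars.lower b := by
  have h : PySem.Chars.lowerChar '>' = '>' := by decide
  simp [PySem.Chars.lower, h]

theorem isKnown_break (a b : List Char) :
    isKnownStart (PySem.Chars.lower (a ++ '>' :: b)) = isKnownStart (PySem.Chars.lower a) := by
  unfold isKnownStart
  rw [lower_break]
  rw [Bool.eq_iff_iff]
  simp only [List.any_eq_true]
  constructor <;> rintro ⟨k, hkmem, hk⟩ <;> refine ⟨k, hkmem, ?_⟩ <;>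
    rw [PySem.Chars.startswith_iff] at hk ⊢
  · exact (prefix_break k (knownStarts_no_gt k hkmem) _ _).mp hk
  · exact (prefix_break k (knownStarts_no_gt k hkmem) _ _).mpr hk

theorem splitGt_ne_nil (l : List Char) : splitGt l ≠ [] := by
  cases l with
  | nil => simp [splitGt]
  | cons c r =>
    unfold splitGt
    cases splitGt r with
    | nil => simp
    | cons s ss => dsimp only; split <;> simp

theorem splitGt_shape (l s : List Char) (ss : List (List Char)) (h : splitGt l = s :: ss) :
    (ss = [] ∧ l = s) ∨ (∃ r, l = s ++ '>' :: r) := by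
  induction l generalizing s ss with
  | nil =>
    rw [show splitGt [] = [[]] from rfl] at h
    injection h with h1 h2
    exact Or.inl ⟨h2.symm, h1⟩
  | cons c r ih =>
    unfold splitGt at h
    rcases hr : splitGt r with _ | ⟨s', ss'⟩
    · exact absurd hr (splitGt_ne_nil r)
    · rw [hr] at h
      dsimp only at h
      by_cases hc : c = '>'
      · rw [if_pos hc] at h
        injection h with h1 h2
        subst h1 hc
        exact Or.inr ⟨r, by simp⟩
      · rw [if_neg hc] at h
        injection h with h1 h2
        subst h2
        rcases ih s' ss' hr with ⟨rfl, rfl⟩ | ⟨r', hr'⟩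
        · exact Or.inl ⟨rfl, by rw [← h1]⟩
        · exact Or.inr ⟨r', by rw [← h1, hr']; simp⟩

-- the join with the incoming in_tag value from A feeding the first separator
def goJ : List (List Char) → Bool → List Char
  | [], _ => []
  | [s], _ => escSeg s
  | s :: ss, t => escSeg s ++ (if t || hasKnown s then ['>'] else "&gt;".toList) ++ goJ ss false

theorem goJ_false (segs : List (List Char)) : goJ segs false = joinB segs := by
  induction segs with
  | nil => rfl
  | cons s ss ih =>
    cases ss with
    | nil => rfl
    | cons s2 ss2 => simp only [goJ, joinB, Bool.false_or]; rw [ih]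

theorem goJ_single (s : List Char) (t : Bool) : goJ [s] t = escSeg s := rfl

theorem goJ_cons (s s2 : List Char) (ss : List (List Char)) (t : Bool) :
    goJ (s :: s2 :: ss) t =
      escSeg s ++ (if t || hasKnown s then ['>'] else "&gt;".toList) ++ goJ (s2 :: ss) false := rfl

theorem goA_eq_goJ (l : List Char) : ∀ t, goA l t = goJ (splitGt l) t := by
  induction l with
  | nil => intro t; rfl
  | cons c r ih =>
    intro t
    rcases hsp : splitGt r with _ | ⟨s, ss⟩
    · exact absurd hsp (splitGt_ne_nil r)
    by_cases hc : c = '>'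
    · subst hc
      have hsplit : splitGt ('>' :: r) = [] :: s :: ss := by
        unfold splitGt; rw [hsp]; simp
      rw [hsplit]
      show goA ('>' :: r) t = goJ ([] :: s :: ss) t
      unfold goA
      rw [if_neg (by decide), if_pos rfl]
      have hJ : goJ ([] :: s :: ss) t =
          (if t then ['>'] else "&gt;".toList) ++ goJ (s :: ss) false := by
        simp [goJ, escSeg, hasKnown]
      rw [hJ, ih false, hsp]
      cases t <;> simp
    · have hsplit : splitGt (c :: r) = (c :: s) :: ss := by
        unfold splitGt; rw [hsp]; simp [hc]
      rw [hsplit]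
      have hk : isKnownStart (PySem.Chars.lower (c :: r)) = isKnownStart (PySem.Chars.lower (c :: s)) := by
        rcases splitGt_shape r s ss hsp with ⟨-, rfl⟩ | ⟨r', rfl⟩
        · rfl
        · exact isKnown_break (c :: s) r'
      cases ss with
      | nil =>
        rw [goJ_single]
        show goA (c :: r) t = escSeg (c :: s)
        unfold goA
        by_cases hlt : c = '<'
        · subst hlt
          rw [if_pos rfl, hk]
          by_cases hks : isKnownStart (PySem.Chars.lower ('<' :: s)) = true
          · rw [if_pos hks, ih true, hsp, goJ_single]
            simp [escSeg, hks]
          · rw [if_neg hks, ih t, hsp, goJ_single]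
            simp only [Bool.not_eq_true] at hks
            simp [escSeg, hks]
        · rw [if_neg hlt, if_neg hc, ih t, hsp, goJ_single]
          simp [escSeg, hlt]
      | cons s2 ss2 =>
        rw [goJ_cons]
        show goA (c :: r) t = _
        unfold goA
        by_cases hlt : c = '<'
        · subst hlt
          rw [if_pos rfl, hk]
          by_cases hks : isKnownStart (PySem.Chars.lower ('<' :: s)) = true
          · rw [if_pos hks, ih true, hsp, goJ_cons]
            simp [escSeg, hasKnown, hks]
          · rw [if_neg hks, ih t, hsp, goJ_cons]
            simp only [Bool.not_eq_true] at hks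
            simp [escSeg, hasKnown, hks]
        · rw [if_neg hlt, if_neg hc, ih t, hsp, goJ_cons]
          simp [escSeg, hasKnown, hlt]

-- ===== VERDICT (by name: the statement is the Claim_ definition above) =====
theorem naive_convert_angles_spec : Claim_equal_naive_convert_angles := by
  intro txt _
  show _ = _
  unfold naive_convert_angles naive_convert_angles_alt
  rw [goA_eq_goJ, goJ_false]
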